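-- pv_equiv track=rewrite | github.com/gaya3p/PythonStuff | challenge/infinite_array.py | solve
-- ===== SOURCE A (Python) =====
-- def solve (a, r, l):
--     sums = []
--     n = len(a)
--
--     for x, y in zip(l, r):
--         s = 0
--         f = y-x+1
--         i = (x-1)%n
--
--         while f > 0:
--             s += a[i]
--             i += 1
--             f -= 1
--             if i == n:
--                 i = 0
--
--         sums.append(s)
--
--     return sums
-- ===== SOURCE B (Python) =====
-- def solve(a, r, l):
--     n = len(a)
--     # prefix sums over the doubled array: pref[k] = sum of the first k elements of a+a
--     pref = [0]
--     for v in a + a: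
--         pref.append(pref[-1] + v)
--     total = pref[n] if n else 0
--     sums = []
--     for x, y in zip(l, r):
--         f = y - x + 1
--         if f <= 0:
--             sums.append(0)
--             continue
--         i = (x - 1) % n
--         q, rem = divmod(f, n)
--         sums.append(q * total + pref[i + rem] - pref[i])
--     return sums
-- ===== Notes on version B (the rewrite author's own statement) =====
-- stated objective: faster
-- what changed: Replaces the per-query element-by-element walk over the wrapped array with prefix sums over the doubled array: each query becomes full-cycle-count * total plus one prefix-difference for the partial segment.
import Mathlib
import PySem

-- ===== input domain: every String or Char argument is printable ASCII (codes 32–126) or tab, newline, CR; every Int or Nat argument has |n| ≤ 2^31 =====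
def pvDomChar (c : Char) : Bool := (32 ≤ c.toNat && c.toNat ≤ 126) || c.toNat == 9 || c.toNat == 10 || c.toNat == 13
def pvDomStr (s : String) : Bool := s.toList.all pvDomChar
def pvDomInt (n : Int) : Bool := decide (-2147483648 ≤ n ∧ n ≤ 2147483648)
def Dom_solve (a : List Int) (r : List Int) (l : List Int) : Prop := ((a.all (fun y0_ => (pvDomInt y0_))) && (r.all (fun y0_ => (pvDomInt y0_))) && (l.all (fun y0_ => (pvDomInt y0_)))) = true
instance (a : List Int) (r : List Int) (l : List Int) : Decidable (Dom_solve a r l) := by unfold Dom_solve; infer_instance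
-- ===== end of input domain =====

-- B replaces A's per-query element-by-element wrapped walk with prefix sums over the
-- doubled array (full-cycle count × total + one prefix difference per query); objective: faster.

-- ===== PORT A =====
-- A's while loop; fuel = f.toNat at entry (f decreases by 1 each iteration, so fuel suffices).
-- Python's a[i] is ported as getD: inside Pre_ the index always satisfies 0 ≤ i < len(a).
def solveLoop (a : List Int) (n : Int) : Nat → Int → Int → Int → Int
  | 0, _, s, _ => s
  | fuel+1, f, s, i =>
    if f > 0 then
      let s' := s + a.getD i.toNat 0
      let i' := i + 1
      let i'' := if i' = n then 0 else i'
      solveLoop a n fuel (f-1) s' i''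
    else s

def solve (a : List Int) (r : List Int) (l : List Int) : List Int :=
  let n : Int := a.length
  (List.zip l r).map (fun p =>
    let x := p.1
    let y := p.2
    let f := y - x + 1
    let i := PySem.Int.mod (x - 1) n
    solveLoop a n f.toNat f 0 i)

-- ===== PORT B =====
-- pref built exactly as Source B's loop: start [0], append pref[-1] + v for each v of a + a
def prefB (a : List Int) : List Int :=
  (a ++ a).foldl (fun p v => p ++ [p.getD (p.length - 1) 0 + v]) [0]

def solve_alt (a : List Int) (r : List Int) (l : List Int) : List Int :=
  let n : Int := a.length
  let pref := prefB a
  let total : Int := if a.length = 0 then 0 else pref.getD a.length 0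
  (List.zip l r).map (fun p =>
    let f := p.2 - p.1 + 1
    if f ≤ 0 then 0
    else
      let i := PySem.Int.mod (p.1 - 1) n
      let q := PySem.Int.floordiv f n
      let rem := PySem.Int.mod f n
      q * total + pref.getD (i + rem).toNat 0 - pref.getD i.toNat 0)

-- ===== PRECONDITION & SPEC =====
-- Pre_ excludes exactly the inputs where A raises: a = [] with a non-empty query zip
-- makes A compute (x-1) % 0, a ZeroDivisionError.
def Pre_solve (a : List Int) (r : List Int) (l : List Int) : Prop :=
  a ≠ [] ∨ l = [] ∨ r = []
instance (a : List Int) (r : List Int) (l : List Int) : Decidable (Pre_solve a r l) := by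
  unfold Pre_solve; infer_instance

def pvWitness_solve : List Int × List Int × List Int := ([1, 2, 3], [5, 2], [1, 2])

def Spec_solve (a : List Int) (r : List Int) (l : List Int) (out : List Int) : Prop := out = solve_alt a r l
instance (a : List Int) (r : List Int) (l : List Int) (out : List Int) : Decidable (Spec_solve a r l out) := by unfold Spec_solve; infer_instance

-- ===== CLAIM (what is proved, stated in full; the proofs are below) =====
def Claim_equal_solve : Prop := ∀ (a : List Int) (r : List Int) (l : List Int), Dom_solve a r l → Pre_solve a r l → Spec_solve a r l (solve a r l)

-- ===== LEMMAS AND PROOFS =====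

-- sum of the first k values of g
def rsum (g : Nat → Int) (k : Nat) : Int := ((List.range k).map g).sum

lemma rsum_zero (g : Nat → Int) : rsum g 0 = 0 := rfl

lemma rsum_succ_front (g : Nat → Int) (k : Nat) :
    rsum g (k+1) = g 0 + rsum (fun j => g (j+1)) k := by
  simp [rsum, List.range_succ_eq_map, List.map_map, Function.comp_def]

lemma rsum_succ_back (g : Nat → Int) (k : Nat) :
    rsum g (k+1) = rsum g k + g k := by
  simp [rsum, List.range_succ]

lemma rsum_add (g : Nat → Int) (m k : Nat) :
    rsum g (m + k) = rsum g m + rsum (fun j => g (m + j)) k := by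
  induction k with
  | zero => simp [rsum_zero]
  | succ k ih => rw [← Nat.add_assoc, rsum_succ_back, ih, rsum_succ_back]; ring

lemma rsum_congr (g h : Nat → Int) (k : Nat) (he : ∀ j, j < k → g j = h j) :
    rsum g k = rsum h k := by
  unfold rsum
  congr 1
  exact List.map_congr_left (fun j hj => he j (List.mem_range.mp hj))

-- loop characterization: solveLoop sums fn terms of a at indices cycling mod length
lemma solveLoop_eq (a : List Int) (ha : a ≠ []) :
    ∀ (fn : Nat) (s : Int) (i : Nat), i < a.length →
    solveLoop a (a.length : Int) fn (fn : Int) s (i : Int)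
      = s + rsum (fun j => a.getD ((i + j) % a.length) 0) fn := by
  intro fn
  induction fn with
  | zero => intro s i hi; simp [solveLoop, rsum_zero]
  | succ fn ih =>
    intro s i hi
    have hlen : 0 < a.length := List.length_pos_of_ne_nil ha
    have hpos : (0:Int) < ((fn+1:Nat):Int) := by positivity
    have hf1 : ((fn+1:Nat):Int) - 1 = (fn:Int) := by push_cast; ring
    have hidx : (if ((i:Int) + 1 = (a.length:Int)) then (0:Int) else (i:Int) + 1)
        = (((i + 1) % a.length : Nat) : Int) := by
      by_cases h : i + 1 = a.length
      · have hc : (i:Int) + 1 = (a.length:Int) := by exact_mod_cast h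
        rw [if_pos hc]
        simp [h, Nat.mod_self]
      · have h1 : i + 1 < a.length := by omega
        have h2 : ((i:Int) + 1 ≠ (a.length:Int)) := by
          intro hc; apply h; exact_mod_cast hc
        rw [if_neg h2, Nat.mod_eq_of_lt h1]; push_cast; ring
    simp only [solveLoop, gt_iff_lt, hpos, if_pos, Int.toNat_natCast, hf1, hidx]
    rw [ih (s + a.getD i 0) ((i+1) % a.length) (Nat.mod_lt _ hlen)]
    rw [rsum_succ_front]
    have : ∀ j, j < fn → a.getD (((i+1) % a.length + j) % a.length) 0
        = a.getD ((i + (j+1)) % a.length) 0 := by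
      intro j hj
      congr 1
      rw [Nat.mod_add_mod]
      congr 1
      omega
    rw [rsum_congr _ _ fn this]
    simp only [Nat.add_zero, Nat.mod_eq_of_lt hi]
    ring

-- rotation: summing a full period starting anywhere gives the total
lemma rot_sum (a : List Int) (i : Nat) :
    rsum (fun j => a.getD ((i + j) % a.length) 0) a.length
      = rsum (fun j => a.getD j 0) a.length := by
  induction i with
  | zero =>
    apply rsum_congr; intro j hj; simp [Nat.mod_eq_of_lt hj]
  | succ i ih =>
    have h1 : rsum (fun j => a.getD ((i+1+j) % a.length) 0) a.length
        = rsum (fun j => a.getD ((i+(j+1)) % a.length) 0) a.length := by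
      apply rsum_congr; intro j hj; congr 2; omega
    have h2 := rsum_succ_front (fun j => a.getD ((i+j) % a.length) 0) a.length
    have h3 := rsum_succ_back (fun j => a.getD ((i+j) % a.length) 0) a.length
    have hper : a.getD ((i + a.length) % a.length) 0 = a.getD (i % a.length) 0 := by
      congr 1
      exact Nat.add_mod_right i a.length
    simp only [Nat.add_zero] at h2 h3
    rw [h1]
    have h4 : rsum (fun j => a.getD ((i+(j+1)) % a.length) 0) a.length
        = rsum (fun j => a.getD ((i+j) % a.length) 0) a.length := by
      omega
    rw [h4, ih]

-- periodic split: c full cycles plus a partial segment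
lemma periodic_split (a : List Int) (i : Nat) :
    ∀ (c rem : Nat),
    rsum (fun j => a.getD ((i + j) % a.length) 0) (c * a.length + rem)
      = c * rsum (fun j => a.getD j 0) a.length
        + rsum (fun j => a.getD ((i + j) % a.length) 0) rem := by
  intro c
  induction c with
  | zero => intro rem; simp
  | succ c ih =>
    intro rem
    have harr : (c+1) * a.length + rem = a.length + (c * a.length + rem) := by ring
    rw [harr, rsum_add]
    have hg : ∀ j, j < c * a.length + rem →
        a.getD ((i + (a.length + j)) % a.length) 0 = a.getD ((i + j) % a.length) 0 := by
      intro j hj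
      congr 1
      rw [show i + (a.length + j) = (i + j) + a.length by ring, Nat.add_mod_right]
    rw [rsum_congr _ _ _ hg, rot_sum a i, ih rem]
    push_cast; ring

-- running partial sums, to characterize Source B's pref-building fold
def partials (c : Int) : List Int → List Int
  | [] => []
  | v :: t => (c + v) :: partials (c + v) t

lemma foldl_pref (xs : List Int) :
    ∀ (p : List Int) (c : Int), p ≠ [] → p.getD (p.length - 1) 0 = c →
    xs.foldl (fun p v => p ++ [p.getD (p.length - 1) 0 + v]) p = p ++ partials c xs := by
  induction xs with
  | nil => intro p c _ _; simp [partials]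
  | cons v t ih =>
    intro p c hp hc
    have hlast : (p ++ [c + v]).getD ((p ++ [c + v]).length - 1) 0 = c + v := by
      simp
    rw [List.foldl_cons, hc, ih (p ++ [c + v]) (c + v) (by simp) hlast]
    simp [partials]

lemma partials_getD (xs : List Int) :
    ∀ (c : Int) (k : Nat), k < xs.length →
    (partials c xs).getD k 0 = c + rsum (fun j => xs.getD j 0) (k + 1) := by
  induction xs with
  | nil => intro c k hk; simp at hk
  | cons v t ih =>
    intro c k hk
    cases k with
    | zero =>
      simp [partials, rsum_succ_back, rsum_zero]
    | succ k =>
      have hkt : k < t.length := by simpa using hk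
      have h1 : (partials c (v :: t)).getD (k+1) 0 = (partials (c+v) t).getD k 0 := by
        simp [partials]
      rw [h1, ih (c+v) k hkt]
      have h3 : rsum (fun j => (v :: t).getD j 0) (k + 1 + 1)
          = v + rsum (fun j => t.getD j 0) (k+1) := by
        rw [rsum_succ_front]
        simp only [List.getD_cons_zero, List.getD_cons_succ]
      rw [h3]
      ring

-- prefB a indexes to prefix sums of a ++ a
lemma prefB_getD (a : List Int) (k : Nat) (hk : k ≤ 2 * a.length) :
    (prefB a).getD k 0 = rsum (fun j => (a ++ a).getD j 0) k := by
  have hpref : prefB a = [(0:Int)] ++ partials 0 (a ++ a) := by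
    unfold prefB
    exact foldl_pref (a ++ a) [0] 0 (by simp) (by simp)
  rw [hpref]
  cases k with
  | zero => simp [rsum_zero]
  | succ k =>
    have hkl : k < (a ++ a).length := by simp; omega
    have h1 : ([(0:Int)] ++ partials 0 (a ++ a)).getD (k+1) 0 = (partials 0 (a ++ a)).getD k 0 := by
      simp
    rw [h1, partials_getD (a ++ a) 0 k hkl]
    ring

-- the doubled array wraps modulo the length
lemma double_getD (a : List Int) (m : Nat) (hm : m < 2 * a.length) :
    (a ++ a).getD m 0 = a.getD (m % a.length) 0 := by
  by_cases h : m < a.length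
  · rw [List.getD_append a a 0 m h, Nat.mod_eq_of_lt h]
  · have hle : a.length ≤ m := by omega
    rw [List.getD_append_right a a 0 m hle, Nat.mod_eq_sub_mod hle,
      Nat.mod_eq_of_lt (by omega)]

-- per-query equality of the two ports' map bodies (a nonempty)
lemma query_eq (a : List Int) (ha : a ≠ []) (x y : Int) :
    solveLoop a (a.length : Int) (y - x + 1).toNat (y - x + 1) 0 (PySem.Int.mod (x - 1) (a.length : Int))
    = if y - x + 1 ≤ 0 then 0
      else
        PySem.Int.floordiv (y - x + 1) (a.length : Int) *
            (if a.length = 0 then 0 else (prefB a).getD a.length 0)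
          + (prefB a).getD (PySem.Int.mod (x - 1) (a.length : Int)
              + PySem.Int.mod (y - x + 1) (a.length : Int)).toNat 0
          - (prefB a).getD (PySem.Int.mod (x - 1) (a.length : Int)).toNat 0 := by
  have hlen : 0 < a.length := List.length_pos_of_ne_nil ha
  have hn : (0:Int) < (a.length : Int) := by exact_mod_cast hlen
  set f := y - x + 1 with hf
  by_cases hf0 : f ≤ 0
  · rw [if_pos hf0, Int.toNat_of_nonpos hf0]
    rfl
  · rw [if_neg hf0, if_neg (by omega : ¬ a.length = 0)]
    rw [not_le] at hf0
    set i := PySem.Int.mod (x - 1) (a.length : Int) with hi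
    have hi0 : 0 ≤ i := PySem.Int.mod_nonneg (x - 1) hn
    have hil : i < (a.length : Int) := PySem.Int.mod_lt (x - 1) hn
    obtain ⟨iN, hiN⟩ : ∃ iN : Nat, i = (iN : Int) := ⟨i.toNat, (Int.toNat_of_nonneg hi0).symm⟩
    have hiNl : iN < a.length := by rw [hiN] at hil; exact_mod_cast hil
    obtain ⟨fN, hfN⟩ : ∃ fN : Nat, f = (fN : Int) :=
      ⟨f.toNat, (Int.toNat_of_nonneg (le_of_lt hf0)).symm⟩
    have hA : solveLoop a (a.length : Int) f.toNat f 0 i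
        = rsum (fun j => a.getD ((iN + j) % a.length) 0) fN := by
      rw [hfN, hiN, Int.toNat_natCast]
      simpa using solveLoop_eq a ha fN 0 iN hiNl
    have hq : PySem.Int.floordiv f (a.length : Int) = ((fN / a.length : Nat) : Int) := by
      rw [hfN]; exact PySem.Int.floordiv_natCast fN a.length
    have hr : PySem.Int.mod f (a.length : Int) = ((fN % a.length : Nat) : Int) := by
      rw [hfN]; exact PySem.Int.mod_natCast fN a.length
    have hsum : (i + PySem.Int.mod f (a.length : Int)).toNat = iN + fN % a.length := by
      rw [hiN, hr, ← Nat.cast_add, Int.toNat_natCast]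
    have hremlt : fN % a.length < a.length := Nat.mod_lt _ hlen
    have hp1 : (prefB a).getD (iN + fN % a.length) 0
        = rsum (fun j => (a ++ a).getD j 0) (iN + fN % a.length) :=
      prefB_getD a _ (by omega)
    have hp2 : (prefB a).getD iN 0 = rsum (fun j => (a ++ a).getD j 0) iN :=
      prefB_getD a _ (by omega)
    have htot : (prefB a).getD a.length 0 = rsum (fun j => a.getD j 0) a.length := by
      rw [prefB_getD a a.length (by omega)]
      apply rsum_congr; intro j hj
      rw [List.getD_append a a 0 j hj]
    have hpart : rsum (fun j => (a ++ a).getD j 0) (iN + fN % a.length)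
          - rsum (fun j => (a ++ a).getD j 0) iN
        = rsum (fun j => a.getD ((iN + j) % a.length) 0) (fN % a.length) := by
      rw [rsum_add]
      have hcg : ∀ j, j < fN % a.length →
          (a ++ a).getD (iN + j) 0 = a.getD ((iN + j) % a.length) 0 := by
        intro j hj; exact double_getD a (iN + j) (by omega)
      rw [rsum_congr _ _ _ hcg]
      ring
    have hfN2 : (fN / a.length) * a.length + fN % a.length = fN := by
      calc (fN / a.length) * a.length + fN % a.length
          = a.length * (fN / a.length) + fN % a.length := by ring
        _ = fN := Nat.div_add_mod fN a.length
    have hsplit := periodic_split a iN (fN / a.length) (fN % a.length)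
    rw [hfN2] at hsplit
    rw [hA, hsplit, hq, hsum, hp1, hiN, Int.toNat_natCast, hp2, htot]
    linarith [hpart]

lemma main_eq (a r l : List Int) (h : a ≠ [] ∨ l = [] ∨ r = []) :
    solve a r l = solve_alt a r l := by
  by_cases ha : a = []
  · have hz : List.zip l r = [] := by
      rcases h with h | h | h
      · exact absurd ha h
      · simp [h]
      · simp [h]
    simp [solve, solve_alt, hz]
  · simp only [solve, solve_alt]
    apply List.map_congr_left
    rintro ⟨x, y⟩ -
    exact query_eq a ha x y

-- ===== VERDICT (by name: the statement is the Claim_ definition above) =====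
theorem solve_spec : Claim_equal_solve := by
  intro a r l _ hpre
  exact main_eq a r l hpre
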